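-- pv_equiv track=rewrite | github.com/AzizAlqasem/CC_TDC | tools/data_flow.py | header_to_dict
-- ===== SOURCE A (Python) =====
-- def header_to_dict(file_str):
--     """ Parse data (.txt) filse heasers to dict
--     """
--     hd = {}
--     for line in file_str.split('\n'):
--         if line.startswith("#") and ":" in line:
--             line = line.replace('# ','').replace('\r','')
--             parts = line.split(":")
--             key = parts[0]
--             if len(parts) == 2:
--                 value = parts[1]
--             else:
--                 value = ' '.join(parts[1:])
--             hd[key] = value
--         else: #This is valued for header only
--             return hd
-- ===== SOURCE B (Python) =====
-- def _parse(line):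
--     line = line.replace('# ', '').replace('\r', '')
--     parts = line.split(':')
--     return parts[0], ' '.join(parts[1:])
--
--
-- def header_to_dict(file_str):
--     lines = file_str.split('\n')
--     n = 0
--     while n < len(lines) and lines[n].startswith('#') and ':' in lines[n]:
--         n += 1
--     return {k: v for k, v in map(_parse, lines[:n])}
-- ===== Notes on version B (the rewrite author's own statement) =====
-- stated objective: alternative
-- what changed: A interleaves scanning and parsing in one early-returning loop over lines with a mutable dict; B first computes the length of the header prefix with a while-scan (takewhile), then builds the dict in a separate map/dict-comprehension pass over that prefix, with one unified space-joined value formula instead of A's two-way branch.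
-- outside the precondition, e.g. on header_to_dict('#a:1'): A returns None, B returns {'#a': '1'}
import Mathlib
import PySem

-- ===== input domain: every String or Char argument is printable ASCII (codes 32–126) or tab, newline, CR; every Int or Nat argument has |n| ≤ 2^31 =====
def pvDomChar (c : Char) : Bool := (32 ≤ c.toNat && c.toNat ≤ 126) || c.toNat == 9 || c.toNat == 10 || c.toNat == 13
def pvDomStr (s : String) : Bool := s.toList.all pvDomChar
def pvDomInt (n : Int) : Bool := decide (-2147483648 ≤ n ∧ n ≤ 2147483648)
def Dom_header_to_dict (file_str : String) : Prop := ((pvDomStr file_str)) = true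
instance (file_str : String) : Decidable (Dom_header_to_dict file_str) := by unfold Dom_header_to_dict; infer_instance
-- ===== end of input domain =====

-- B restructures A (scan-then-parse, one value formula) — same cost, different shape; equal wherever A returns a dict.

-- ===== PORT A =====
-- the loop test 'line.startswith("#") and ":" in line'
def hdLinePred (line : String) : Bool :=
  PySem.Str.startswith line "#" && PySem.Str.isIn ":" line

-- A's loop: insert header lines into hd; on the first non-header line return hd.
-- (Python falls off the loop end returning None when every line is a header line;
--  that case is excluded by Pre_ below, and this port returns hd there.)
def hdLoopA : List String → PySem.Dict String String → PySem.Dict String String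
  | [], hd => hd
  | line :: rest, hd =>
    if hdLinePred line then
      let line' := PySem.Str.replace (PySem.Str.replace line "# " "") "\r" ""
      let parts := (PySem.Chars.splitOn line'.toList ":".toList).map String.ofList
      let key := parts.headD ""            -- parts[0]; split is never empty
      let value := if parts.length == 2
                   then parts.getD 1 ""    -- parts[1]; in range since length = 2
                   else PySem.Str.join " " (parts.drop 1)
      hdLoopA rest (hd.insert key value)
    else hd

def header_to_dict (file_str : String) : List (String × String) :=
  (hdLoopA ((PySem.Chars.splitOn file_str.toList "\n".toList).map String.ofList)
    PySem.Dict.empty).items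

-- ===== PORT B =====
def hdParse (line : String) : String × String :=
  let line' := PySem.Str.replace (PySem.Str.replace line "# " "") "\r" ""
  let parts := (PySem.Chars.splitOn line'.toList ":".toList).map String.ofList
  (parts.headD "", PySem.Str.join " " (parts.drop 1))   -- parts[0]; split never empty

def header_to_dict_alt (file_str : String) : List (String × String) :=
  let lines := (PySem.Chars.splitOn file_str.toList "\n".toList).map String.ofList
  let hdr := lines.takeWhile (fun l => PySem.Str.startswith l "#" && PySem.Str.isIn ":" l)
  ((hdr.map hdParse).foldl (fun d p => d.insert p.1 p.2) PySem.Dict.empty).items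

-- ===== PRECONDITION & SPEC =====
-- Pre_ excludes inputs on which EVERY line is a header line: there Python A runs off
-- the end of its loop and returns None, not a dict (B returns the parsed dict).
def Pre_header_to_dict (file_str : String) : Prop :=
  ∃ line ∈ ((PySem.Chars.splitOn file_str.toList "\n".toList).map String.ofList),
    ¬ (PySem.Str.startswith line "#" && PySem.Str.isIn ":" line) = true
instance (file_str : String) : Decidable (Pre_header_to_dict file_str) := by
  unfold Pre_header_to_dict; infer_instance

def pvWitness_header_to_dict : String := "# Key: v\n# B:c:d\nbody"

def Spec_header_to_dict (file_str : String) (out : List (String × String)) : Prop := out = header_to_dict_alt file_str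
instance (file_str : String) (out : List (String × String)) : Decidable (Spec_header_to_dict file_str out) := by unfold Spec_header_to_dict; infer_instance

-- ===== CLAIM (what is proved, stated in full; the proofs are below) =====
def Claim_equal_header_to_dict : Prop := ∀ (file_str : String), Dom_header_to_dict file_str → Pre_header_to_dict file_str → Spec_header_to_dict file_str (header_to_dict file_str)

-- ===== LEMMAS AND PROOFS =====

-- A's branch value equals B's unified join formula (len(parts) == 2 ⟹ join of the singleton tail).
theorem hd_value_eq (parts : List String) :
    (if parts.length == 2 then parts.getD 1 "" else PySem.Str.join " " (parts.drop 1))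
      = PySem.Str.join " " (parts.drop 1) := by
  split
  · rename_i h
    match parts, h with
    | [a, b], _ => simp [PySem.Str.join]
  · rfl

-- A's loop is B's fold over the takeWhile prefix (A is total here; Python's None
-- fall-through only happens when takeWhile consumes everything, excluded by Pre_).
theorem hdLoopA_eq (lines : List String) (hd : PySem.Dict String String) :
    hdLoopA lines hd
      = ((lines.takeWhile (fun l => PySem.Str.startswith l "#" && PySem.Str.isIn ":" l)).map hdParse).foldl
          (fun d p => d.insert p.1 p.2) hd := by
  induction lines generalizing hd with
  | nil => simp [hdLoopA]
  | cons line rest ih =>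
    by_cases h : hdLinePred line = true
    · have h' : (PySem.Str.startswith line "#" && PySem.Str.isIn ":" line) = true := h
      simp only [hdLoopA, h, if_pos, List.takeWhile_cons, h', List.map_cons, List.foldl_cons]
      rw [ih, hd_value_eq, hdParse]
    · have hc : ¬ (PySem.Chars.startswith line.toList ['#'] = true ∧
          PySem.Chars.isIn [':'] line.toList = true) := by
        simpa [hdLinePred] using h
      simp [hdLoopA, hdLinePred, hc]

-- ===== VERDICT (by name: the statement is the Claim_ definition above) =====
theorem header_to_dict_spec : Claim_equal_header_to_dict := by
  intro file_str _ _
  unfold Spec_header_to_dict header_to_dict header_to_dict_alt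
  rw [hdLoopA_eq]
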